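-- pv_equiv track=rewrite | github.com/iwaspeter/misc | move.py | ret_ops
-- ===== SOURCE A (Python) =====
-- def ret_ops(num):
--     ops = []
--     for n in range(0, num):
--         for m in range(0,num):
--             if (n == m):
--                 continue
--             ops.append([n,m])
--     return ops
-- ===== SOURCE B (Python) =====
-- def ret_ops(num):
--     k = num - 1
--     if k <= 0:
--         return []
--     vals = list(range(num))
--     ops = []
--     for i in range(num * k):
--         q, r = divmod(i, k)
--         ops.append([vals[q], vals[r + 1 if r >= q else r]])
--     return ops
-- ===== Notes on version B (the rewrite author's own statement) =====
-- stated objective: alternative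
-- what changed: Replaces the nested loops with the diagonal-skip guard by a single flat loop over num*(num-1) pair indices, decoding each index i by divmod as row q and column r shifted past the diagonal, with a prebuilt value table for the pair entries.
import Mathlib
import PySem

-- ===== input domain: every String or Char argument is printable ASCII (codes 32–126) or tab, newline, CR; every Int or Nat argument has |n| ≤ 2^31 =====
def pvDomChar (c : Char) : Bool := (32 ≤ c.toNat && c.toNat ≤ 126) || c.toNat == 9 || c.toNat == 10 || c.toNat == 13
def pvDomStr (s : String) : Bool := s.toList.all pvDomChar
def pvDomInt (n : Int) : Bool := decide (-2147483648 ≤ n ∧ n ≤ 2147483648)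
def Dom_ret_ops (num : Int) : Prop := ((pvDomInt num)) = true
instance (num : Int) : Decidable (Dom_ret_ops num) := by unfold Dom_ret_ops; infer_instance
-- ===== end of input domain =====

-- B replaces A's nested loops by a single flat loop over pair indices decoded by div/mod (alternative algorithm, same cost).

-- ===== PORT A =====
-- ret_ops: literal port of A's nested range loop with the n == m continue guard.
def ret_ops (num : Int) : List (List Int) :=
  (PySem.List.pyRange 0 num 1).foldl
    (fun ops n =>
      (PySem.List.pyRange 0 num 1).foldl
        (fun ops m => if n = m then ops else ops ++ [[n, m]]) ops)
    []

-- ===== PORT B =====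
-- ret_ops_alt: port of B; one flat loop over num*(num-1) pair indices, each
-- decoded by divmod as row q and column r (+1 past the diagonal), looked up in vals.
def ret_ops_alt (num : Int) : List (List Int) :=
  let k := num - 1
  if k ≤ 0 then []
  else
    let vals := PySem.List.pyRange 0 num 1
    (PySem.List.pyRange 0 (num * k) 1).foldl
      (fun ops i =>
        let q := PySem.Int.floordiv i k
        let r := PySem.Int.mod i k
        ops ++ [[PySem.List.pyGetD vals q 0,
                 PySem.List.pyGetD vals (if r ≥ q then r + 1 else r) 0]])
      []

-- ===== PRECONDITION & SPEC =====
def Spec_ret_ops (num : Int) (out : List (List Int)) : Prop := out = ret_ops_alt num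
instance (num : Int) (out : List (List Int)) : Decidable (Spec_ret_ops num out) := by unfold Spec_ret_ops; infer_instance

-- ===== CLAIM (what is proved, stated in full; the proofs are below) =====
def Claim_equal_ret_ops : Prop := ∀ (num : Int), Dom_ret_ops num → Spec_ret_ops num (ret_ops num)

-- ===== LEMMAS AND PROOFS =====

lemma foldl_append_map {α β : Type} (f : α → β) (l : List α) (acc : List β) :
    l.foldl (fun acc x => acc ++ [f x]) acc = acc ++ l.map f := by
  induction l generalizing acc with
  | nil => simp
  | cons x xs ih => rw [List.foldl_cons, ih]; simp

lemma pv_getD_map_range (n x : ℕ) (hx : x < n) :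
    PySem.List.pyGetD ((List.range n).map (fun k : ℕ => (k : Int))) (x : Int) 0
      = (x : Int) := by
  rw [PySem.List.pyGetD_natCast, List.getD_eq_getElem?_getD, List.getElem?_map,
    List.getElem?_range hx]
  simp

lemma inner_fold (n : Int) (l : List Int) (acc : List (List Int)) :
    l.foldl (fun ops m => if n = m then ops else ops ++ [[n, m]]) acc
      = acc ++ (l.filter (fun m => decide (m ≠ n))).map (fun m => [n, m]) := by
  induction l generalizing acc with
  | nil => simp
  | cons x xs ih =>
    rw [List.foldl_cons]
    by_cases h : n = x
    · subst h; rw [if_pos rfl, ih]; simp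
    · rw [if_neg h, ih]; simp [Ne.symm h]

lemma outer_fold (f : List Int) (l : List Int) (acc : List (List Int)) :
    l.foldl (fun ops n =>
        f.foldl (fun ops m => if n = m then ops else ops ++ [[n, m]]) ops) acc
      = acc ++ l.flatMap
          (fun n => (f.filter (fun m => decide (m ≠ n))).map (fun m => [n, m])) := by
  induction l generalizing acc with
  | nil => simp
  | cons x xs ih => rw [List.foldl_cons, inner_fold, ih]; simp

lemma filter_range_ne (N n : ℕ) (hn : n < N) :
    (List.range N).filter (fun m => decide (m ≠ n))
      = (List.range (N - 1)).map (fun j => if j < n then j else j + 1) := by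
  obtain ⟨r, hr⟩ : ∃ r, N = (n + 1) + r := ⟨N - n - 1, by omega⟩
  subst hr
  rw [List.range_add, List.range_succ]
  have h1 : (List.range n).filter (fun m => decide (m ≠ n)) = List.range n := by
    rw [List.filter_eq_self]; intro a ha; simp at ha ⊢; omega
  have h2 : (n + 1 + r - 1) = n + r := by omega
  rw [h2, List.range_add]
  simp only [List.filter_append, h1, List.filter_map, List.filter_cons,
    List.filter_nil]
  have h3 : (List.range n).map (fun j => if j < n then j else j + 1)
      = List.range n := by
    rw [List.map_congr_left (g := id) (fun a ha => by simp at ha ⊢; omega)]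
    simp
  simp only [List.map_append, h3]
  congr 1
  · simp
  · have h4 : (List.range r).filter ((fun m => decide (m ≠ n)) ∘ fun x => n + 1 + x)
        = List.range r := by
      rw [List.filter_eq_self]; intro a _; simp; omega
    rw [h4, List.map_map]
    apply List.map_congr_left
    intro a _
    simp only [Function.comp_apply]
    rw [if_neg (by omega)]
    omega

def pvPair (n j : ℕ) : List Int :=
  [(n : Int), if j < n then (j : Int) else (j : Int) + 1]

lemma flat_range (g : ℕ → ℕ → List Int) (k : ℕ) (hk : 0 < k) (M : ℕ) :
    (List.range M).flatMap (fun n => (List.range k).map (g n))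
      = (List.range (M * k)).map (fun i => g (i / k) (i % k)) := by
  induction M with
  | zero => simp
  | succ M ih =>
    rw [List.range_succ, List.flatMap_append, ih, Nat.succ_mul, List.range_add,
      List.map_append]
    congr 1
    rw [List.map_map]
    simp only [List.flatMap_cons, List.flatMap_nil, List.append_nil]
    apply List.map_congr_left
    intro j hj
    simp only [List.mem_range] at hj
    simp only [Function.comp_apply]
    have hd : (M * k + j) / k = M := by
      rw [Nat.mul_comm M k, Nat.mul_add_div hk, Nat.div_eq_of_lt hj]; omega
    have hm : (M * k + j) % k = j := by
      rw [Nat.mul_comm M k, Nat.mul_add_mod, Nat.mod_eq_of_lt hj]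
    rw [hd, hm]

lemma ret_ops_eq_alt (num : Int) : ret_ops num = ret_ops_alt num := by
  unfold ret_ops ret_ops_alt
  rw [outer_fold]
  simp only [List.nil_append]
  by_cases hle : num - 1 ≤ 0
  · rw [if_pos hle]
    rcases lt_or_eq_of_le hle with h | h
    · rw [PySem.List.pyRange_one_eq_nil (by omega)]; simp
    · have : num = 1 := by omega
      subst this; decide
  · rw [if_neg hle]
    rw [foldl_append_map]
    simp only [List.nil_append]
    set N := num.toNat with hN
    have hnum : num = (N : Int) := by omega
    have hN2 : 2 ≤ N := by omega
    have hk : 0 < N - 1 := by omega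
    rw [hnum, PySem.List.pyRange_zero_natCast,
      show ((N : Int) * ((N : Int) - 1)) = ((N * (N - 1) : ℕ) : Int) by
        rw [Nat.cast_mul, Nat.cast_sub (by omega), Nat.cast_one],
      PySem.List.pyRange_zero_natCast]
    rw [List.flatMap_map, List.map_map]
    trans ((List.range N).flatMap (fun n => (List.range (N - 1)).map (pvPair n)))
    · apply List.flatMap_congr
      intro n hn'
      have hn := List.mem_range.mp hn'
      rw [List.filter_map]
      have hc : ((fun m : ℤ => decide (m ≠ (n : Int))) ∘ (fun k : ℕ => (k : Int)))
          = fun m : ℕ => decide (m ≠ n) := by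
        funext m; simp
      rw [hc, filter_range_ne N n hn, List.map_map, List.map_map]
      apply List.map_congr_left
      intro j _
      simp only [Function.comp_apply, pvPair]
      split_ifs <;> simp
    · rw [flat_range pvPair (N - 1) hk N]
      apply List.map_congr_left
      intro i hi
      have hi' := List.mem_range.mp hi
      simp only [Function.comp_apply, pvPair]
      have hq : i / (N - 1) < N := (Nat.div_lt_iff_lt_mul hk).mpr (by omega)
      have hr : i % (N - 1) < N - 1 := Nat.mod_lt _ hk
      have hdiv : PySem.Int.floordiv (i : Int) ((N : Int) - 1)
          = ((i / (N - 1) : ℕ) : Int) := by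
        rw [show ((N : Int) - 1) = ((N - 1 : ℕ) : Int) by omega]
        exact PySem.Int.floordiv_natCast i (N - 1)
      have hmod : PySem.Int.mod (i : Int) ((N : Int) - 1)
          = ((i % (N - 1) : ℕ) : Int) := by
        rw [show ((N : Int) - 1) = ((N - 1 : ℕ) : Int) by omega]
        exact PySem.Int.mod_natCast i (N - 1)
      rw [hdiv, hmod]
      split_ifs with h1 h2 h2
      · exfalso; omega
      · rw [pv_getD_map_range N _ hq, pv_getD_map_range N _ (by omega)]
      · rw [show ((i % (N - 1) : ℕ) : Int) + 1 = (((i % (N - 1)) + 1 : ℕ) : Int) by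
            push_cast; ring,
          pv_getD_map_range N _ hq, pv_getD_map_range N _ (by omega)]
      · exfalso; omega

-- ===== VERDICT (by name: the statement is the Claim_ definition above) =====
theorem ret_ops_spec : Claim_equal_ret_ops := by
  intro num _
  unfold Spec_ret_ops
  exact ret_ops_eq_alt num
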